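-- pv_equiv track=rewrite | github.com/ajupar/ot2_opentrons | ot2_random_combinations.py | get_expected_appearances
-- ===== SOURCE A (Python) =====
-- from math import factorial as fact
--
-- def binomial(a,b):
--     """" https://www.pythonpool.com/python-binomial-coefficient/ """
--     return fact(a) // fact(b) // fact(a-b)
--
-- def get_expected_appearances(n: int):
--     """ For quality assurance, get the amount of times a species should appear in the combinations """
--     expected = 0
--
--     for k in range(1, (n+1)):
--         if k < n:
--             expected += (binomial(n, k) - binomial(n-1, k))  # subtract combinations where the species shouldn't appear
--         elif k == n:
--             expected += binomial(n, k)  # this is always just 1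
--
--     return expected
-- ===== SOURCE B (Python) =====
-- def get_expected_appearances(n: int):
--     """ For quality assurance, get the amount of times a species should appear in the combinations """
--     # Hockey-stick / binomial-sum closed form: sum_{k=1}^{n} C(n,k) - sum_{k=1}^{n-1} C(n-1,k)
--     # = (2^n - 1) - (2^(n-1) - 1) = 2^(n-1).
--     return 1 << (n - 1) if n >= 1 else 0
-- ===== Notes on version B (the rewrite author's own statement) =====
-- stated objective: faster
-- what changed: Replaced the factorial-based loop over k with the closed form 2^(n-1) (the binomial sums telescope to (2^n-1)-(2^(n-1)-1)), returning 0 for n <= 0.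
import Mathlib
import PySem

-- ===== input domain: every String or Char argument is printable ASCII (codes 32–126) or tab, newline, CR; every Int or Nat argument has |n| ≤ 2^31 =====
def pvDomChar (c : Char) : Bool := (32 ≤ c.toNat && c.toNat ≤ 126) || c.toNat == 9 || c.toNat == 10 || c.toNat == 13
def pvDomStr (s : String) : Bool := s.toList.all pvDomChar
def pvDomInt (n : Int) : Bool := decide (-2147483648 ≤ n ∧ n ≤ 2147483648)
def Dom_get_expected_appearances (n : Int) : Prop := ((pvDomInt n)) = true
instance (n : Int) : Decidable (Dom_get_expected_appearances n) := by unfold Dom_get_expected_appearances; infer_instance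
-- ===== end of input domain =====

-- B replaces A's factorial-based loop with the closed form 2^(n-1) (0 for n ≤ 0); proved equal for all n.

-- ===== PORT A =====
-- fact(a); A only ever calls it with a nonnegative argument
def pyFact (a : Int) : Int := (Nat.factorial a.toNat : Int)

def pyBinomial (a b : Int) : Int :=
  PySem.Int.floordiv (PySem.Int.floordiv (pyFact a) (pyFact b)) (pyFact (a - b))

def get_expected_appearances (n : Int) : Int :=
  (PySem.List.pyRange 1 (n + 1) 1).foldl (fun expected k =>
    if k < n then expected + (pyBinomial n k - pyBinomial (n - 1) k)
    else if k = n then expected + pyBinomial n k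
    else expected) 0

-- ===== PORT B =====
def get_expected_appearances_alt (n : Int) : Int :=
  if n ≥ 1 then (1 : Int) <<< (n - 1).toNat else 0

-- ===== PRECONDITION & SPEC =====
def Spec_get_expected_appearances (n : Int) (out : Int) : Prop := out = get_expected_appearances_alt n
instance (n : Int) (out : Int) : Decidable (Spec_get_expected_appearances n out) := by unfold Spec_get_expected_appearances; infer_instance

-- ===== CLAIM (what is proved, stated in full; the proofs are below) =====
def Claim_equal_get_expected_appearances : Prop := ∀ (n : Int), Dom_get_expected_appearances n → Spec_get_expected_appearances n (get_expected_appearances n)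

-- ===== LEMMAS AND PROOFS =====

-- the per-iteration contribution of A's loop
def pvTerm (n k : Int) : Int :=
  if k < n then pyBinomial n k - pyBinomial (n - 1) k
  else if k = n then pyBinomial n k
  else 0

lemma pyFact_natCast (m : Nat) : pyFact (m : Int) = (Nat.factorial m : Int) := by
  simp [pyFact]

lemma pyBinomial_natCast (a k : Nat) (h : k ≤ a) :
    pyBinomial (a : Int) (k : Int) = (Nat.choose a k : Int) := by
  have hsub : (a : Int) - (k : Int) = ((a - k : Nat) : Int) := by
    omega
  rw [pyBinomial, hsub, pyFact_natCast, pyFact_natCast, pyFact_natCast,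
    PySem.Int.floordiv_natCast, PySem.Int.floordiv_natCast,
    Nat.div_div_eq_div_mul, ← Nat.choose_eq_factorial_div_factorial h]

lemma pyRange_one_map (N : Nat) :
    PySem.List.pyRange 1 ((N : Int) + 1) 1 = (List.range N).map (fun (i : Nat) => (i : Int) + 1) := by
  induction N with
  | zero => simp [PySem.List.pyRange_one_eq_nil]
  | succ m ih =>
    have : ((m + 1 : Nat) : Int) + 1 = ((m : Int) + 1) + 1 := by push_cast; ring
    rw [this, PySem.List.pyRange_one_succ_right (by omega), ih, List.range_succ]
    simp

lemma foldl_eq_sum_pvTerm (n : Int) (l : List Int) :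
    l.foldl (fun expected k =>
      if k < n then expected + (pyBinomial n k - pyBinomial (n - 1) k)
      else if k = n then expected + pyBinomial n k
      else expected) 0 = (l.map (pvTerm n)).sum := by
  have hb : (fun (expected k : Int) =>
      if k < n then expected + (pyBinomial n k - pyBinomial (n - 1) k)
      else if k = n then expected + pyBinomial n k
      else expected) = fun expected k => expected + pvTerm n k := by
    funext e k
    simp only [pvTerm]
    split_ifs <;> ring
  rw [hb, PySem.List.foldl_add]
  ring

lemma sum_range_map (N : Nat) (f : Nat → Int) :
    ((List.range N).map f).sum = ∑ i ∈ Finset.range N, f i := rfl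

lemma sum_choose_succ (M : Nat) :
    (∑ i ∈ Finset.range M, (Nat.choose M (i + 1) : Int)) = 2 ^ M - 1 := by
  have h := Nat.sum_range_choose M
  rw [Finset.sum_range_succ'] at h
  simp only [Nat.choose_zero_right] at h
  have : (((∑ k ∈ Finset.range M, Nat.choose M (k + 1)) : Nat) : Int)
      = ∑ i ∈ Finset.range M, (Nat.choose M (i + 1) : Int) := by
    push_cast; rfl
  have h2 : ((2 ^ M : Nat) : Int) = 2 ^ M := by push_cast; rfl
  omega

lemma main_pos (N : Nat) (hN : 1 ≤ N) :
    get_expected_appearances (N : Int) = 2 ^ (N - 1) := by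
  rw [get_expected_appearances, foldl_eq_sum_pvTerm, pyRange_one_map, List.map_map,
    sum_range_map]
  simp only [Function.comp_def]
  have hterm : ∀ i ∈ Finset.range N, pvTerm (N : Int) ((i : Int) + 1)
      = (Nat.choose N (i + 1) : Int)
        - (if i + 1 < N then (Nat.choose (N - 1) (i + 1) : Int) else 0) := by
    intro i hi
    have hiN : i < N := Finset.mem_range.mp hi
    simp only [pvTerm]
    have hcast : (i : Int) + 1 = ((i + 1 : Nat) : Int) := by push_cast; ring
    by_cases hlt : i + 1 < N
    · have h1 : ((i : Int) + 1) < (N : Int) := by omega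
      have h2 : ((N : Int)) - 1 = ((N - 1 : Nat) : Int) := by omega
      rw [if_pos h1, if_pos hlt, hcast, h2,
        pyBinomial_natCast N (i + 1) (by omega),
        pyBinomial_natCast (N - 1) (i + 1) (by omega)]
    · have heq : i + 1 = N := by omega
      have h1 : ¬ ((i : Int) + 1) < (N : Int) := by omega
      have h2 : ((i : Int) + 1) = (N : Int) := by omega
      rw [if_neg h1, if_pos h2, if_neg hlt, hcast,
        pyBinomial_natCast N (i + 1) (by omega), sub_zero]
  rw [Finset.sum_congr rfl hterm, Finset.sum_sub_distrib]
  have hA : (∑ i ∈ Finset.range N, (Nat.choose N (i + 1) : Int)) = 2 ^ N - 1 :=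
    sum_choose_succ N
  have hB : (∑ i ∈ Finset.range N,
      (if i + 1 < N then (Nat.choose (N - 1) (i + 1) : Int) else 0)) = 2 ^ (N - 1) - 1 := by
    obtain ⟨M, rfl⟩ : ∃ M, N = M + 1 := ⟨N - 1, by omega⟩
    rw [Finset.sum_range_succ, if_neg (by omega)]
    have : (∑ i ∈ Finset.range M,
        (if i + 1 < M + 1 then (Nat.choose (M + 1 - 1) (i + 1) : Int) else 0))
        = ∑ i ∈ Finset.range M, (Nat.choose M (i + 1) : Int) := by
      apply Finset.sum_congr rfl
      intro i hi
      have hiM := Finset.mem_range.mp hi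
      rw [if_pos (by omega)]
      simp
    rw [this, sum_choose_succ M]
    simp
  rw [hA, hB]
  have hpow : (2 : Int) ^ N = 2 * 2 ^ (N - 1) := by
    obtain ⟨M, rfl⟩ : ∃ M, N = M + 1 := ⟨N - 1, by omega⟩
    rw [pow_succ]
    ring_nf
    simp
  rw [hpow]; ring

-- ===== VERDICT (by name: the statement is the Claim_ definition above) =====
theorem get_expected_appearances_spec : Claim_equal_get_expected_appearances := by
  intro n _
  unfold Spec_get_expected_appearances get_expected_appearances_alt
  by_cases hn : n ≥ 1
  · obtain ⟨N, rfl⟩ : ∃ N : Nat, n = (N : Int) := ⟨n.toNat, by omega⟩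
    have hN : 1 ≤ N := by omega
    rw [if_pos hn, main_pos N hN, Int.shiftLeft_eq, one_mul]
    congr 1
    omega
  · rw [if_neg hn, get_expected_appearances,
      PySem.List.pyRange_one_eq_nil (by omega)]
    rfl
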